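-- pv_equiv track=rewrite | github.com/LilToreyFTW/deathdub | build/exe.linux-x86_64-3.13/security_scanner.py | has_repetitive_patterns
-- ===== SOURCE A (Python) =====
-- def has_repetitive_patterns(password: str) -> bool:
--     """Check for repetitive patterns"""
--     # Check for repeated characters
--     for i in range(len(password) - 2):
--         if password[i] == password[i+1] == password[i+2]:
--             return True
--
--     # Check for sequential characters
--     for i in range(len(password) - 2):
--         if (ord(password[i+1]) == ord(password[i]) + 1 and
--             ord(password[i+2]) == ord(password[i+1]) + 1):
--             return True
--
--     # Check for keyboard patterns
--     keyboard_rows = ['qwertyuiop', 'asdfghjkl', 'zxcvbnm']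
--     for row in keyboard_rows:
--         for i in range(len(row) - 2):
--             pattern = row[i:i+3]
--             if pattern in password.lower():
--                 return True
--
--     return False
-- ===== SOURCE B (Python) =====
-- _KEYBOARD_TRIPLES = {row[i:i+3]
--                      for row in ('qwertyuiop', 'asdfghjkl', 'zxcvbnm')
--                      for i in range(len(row) - 2)}
--
--
-- def has_repetitive_patterns(password: str) -> bool:
--     """Check for repetitive patterns (single table-driven pass)."""
--     low = password.lower()
--     for i in range(len(password) - 2):
--         a, b, c = password[i], password[i+1], password[i+2]
--         if a == b == c:
--             return True
--         if ord(b) == ord(a) + 1 and ord(c) == ord(b) + 1: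
--             return True
--         if low[i:i+3] in _KEYBOARD_TRIPLES:
--             return True
--     return False
-- ===== Notes on version B (the rewrite author's own statement) =====
-- stated objective: simpler
-- what changed: Replaces A's three separate scans (repeat scan, sequential scan, and a per-keyboard-triple substring search over the whole password) by one precomputed set of keyboard triples and a single window pass over the password that checks all three conditions at once.
import Mathlib
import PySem

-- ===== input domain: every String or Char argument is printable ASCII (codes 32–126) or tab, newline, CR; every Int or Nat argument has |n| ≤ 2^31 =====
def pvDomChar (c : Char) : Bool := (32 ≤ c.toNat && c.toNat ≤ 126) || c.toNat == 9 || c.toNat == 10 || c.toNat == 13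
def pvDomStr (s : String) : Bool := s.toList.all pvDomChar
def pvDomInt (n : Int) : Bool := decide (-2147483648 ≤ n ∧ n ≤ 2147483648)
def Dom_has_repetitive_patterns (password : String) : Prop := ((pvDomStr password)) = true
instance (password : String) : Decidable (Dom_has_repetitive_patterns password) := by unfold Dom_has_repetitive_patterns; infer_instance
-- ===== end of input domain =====

-- B replaces A's three separate scans by one precomputed set of keyboard triples and a single
-- window pass checking all three conditions at once (objective: simpler).

-- ===== PORT A =====
-- keyboard_rows = ['qwertyuiop', 'asdfghjkl', 'zxcvbnm']
def hrpRowsA : List (List Char) :=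
  [['q','w','e','r','t','y','u','i','o','p'], ['a','s','d','f','g','h','j','k','l'], ['z','x','c','v','b','n','m']]

def has_repetitive_patterns (password : String) : Bool :=
  let l := password.toList
  let n : Int := l.length
  -- first loop: repeated characters (early return ⇒ List.any over the range)
  if (PySem.List.pyRange 0 (n - 2) 1).any (fun i =>
       PySem.List.pyGetD l i ' ' == PySem.List.pyGetD l (i+1) ' ' &&
       PySem.List.pyGetD l (i+1) ' ' == PySem.List.pyGetD l (i+2) ' ') then true
  -- second loop: sequential characters
  else if (PySem.List.pyRange 0 (n - 2) 1).any (fun i =>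
       (((PySem.List.pyGetD l (i+1) ' ').toNat : Int) == ((PySem.List.pyGetD l i ' ').toNat : Int) + 1) &&
       (((PySem.List.pyGetD l (i+2) ' ').toNat : Int) == ((PySem.List.pyGetD l (i+1) ' ').toNat : Int) + 1)) then true
  -- third loop: each keyboard triple searched as a substring of password.lower()
  else if hrpRowsA.any (fun row =>
       (PySem.List.pyRange 0 ((row.length : Int) - 2) 1).any (fun i =>
         PySem.Chars.isIn (PySem.List.slice row (some i) (some (i+3))) (PySem.Chars.lower l))) then true
  else false

-- ===== PORT B =====
-- _KEYBOARD_TRIPLES: the set comprehension over the row literals, built once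
def hrpKeyTriples : PySem.Set (List Char) :=
  PySem.Set.ofList (([['q','w','e','r','t','y','u','i','o','p'], ['a','s','d','f','g','h','j','k','l'], ['z','x','c','v','b','n','m']] : List (List Char)).flatMap (fun row =>
    (PySem.List.pyRange 0 ((row.length : Int) - 2) 1).map (fun i =>
      PySem.List.slice row (some i) (some (i+3)))))

def has_repetitive_patterns_alt (password : String) : Bool :=
  let l := password.toList
  let low := PySem.Chars.lower l
  (PySem.List.pyRange 0 ((l.length : Int) - 2) 1).any (fun i =>
    let a := PySem.List.pyGetD l i ' '
    let b := PySem.List.pyGetD l (i+1) ' '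
    let c := PySem.List.pyGetD l (i+2) ' '
    (a == b && b == c) ||
    (((b.toNat : Int) == (a.toNat : Int) + 1) && ((c.toNat : Int) == (b.toNat : Int) + 1)) ||
    PySem.Set.contains hrpKeyTriples (PySem.List.slice low (some i) (some (i+3))))

-- ===== PRECONDITION & SPEC =====
def Spec_has_repetitive_patterns (password : String) (out : Bool) : Prop := out = has_repetitive_patterns_alt password
instance (password : String) (out : Bool) : Decidable (Spec_has_repetitive_patterns password out) := by unfold Spec_has_repetitive_patterns; infer_instance

-- ===== CLAIM (what is proved, stated in full; the proofs are below) =====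
def Claim_equal_has_repetitive_patterns : Prop := ∀ (password : String), Dom_has_repetitive_patterns password → Spec_has_repetitive_patterns password (has_repetitive_patterns password)

-- ===== LEMMAS AND PROOFS =====

-- length-3 infix ↔ some window of the single pass equals it
lemma hrp_infix3_iff (t s : List Char) (ht : t.length = 3) :
    t <:+: s ↔ ∃ i ∈ PySem.List.pyRange 0 ((s.length : Int) - 2) 1,
      PySem.List.slice s (some i) (some (i+3)) = t := by
  constructor
  · rintro ⟨u, v, rfl⟩
    refine ⟨(u.length : Int), ?_, ?_⟩
    · rw [PySem.List.mem_pyRange_one]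
      constructor
      · exact_mod_cast Int.natCast_nonneg u.length
      · have : u.length + 3 ≤ (u ++ t ++ v).length := by
          simp [ht]
        omega
    · have h3 : (u.length : Int) + 3 = ((u.length + 3 : Nat) : Int) := by push_cast; ring
      rw [h3, PySem.List.slice_natCast]
      have : (u ++ t ++ v).drop u.length = t ++ v := by
        rw [List.append_assoc, List.drop_append_of_le_length (le_refl _)]
        simp
      rw [this]
      have h4 : u.length + 3 - u.length = 3 := by omega
      rw [h4, ← ht, List.take_left]
  · rintro ⟨i, hi, hsl⟩
    rw [PySem.List.mem_pyRange_one] at hi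
    obtain ⟨h0, h2⟩ := hi
    obtain ⟨j, rfl⟩ : ∃ j : ℕ, i = (j : Int) := ⟨i.toNat, by omega⟩
    have hjn : j + 3 ≤ s.length := by exact_mod_cast (by omega : (j : Int) + 3 ≤ (s.length : Int))
    have h3' : (j : Int) + 3 = ((j + 3 : Nat) : Int) := by push_cast; ring
    rw [h3', PySem.List.slice_natCast] at hsl
    have ht' : j + 3 - j = 3 := by omega
    rw [ht'] at hsl
    have h1 : t <+: s.drop j := hsl ▸ List.take_prefix 3 (s.drop j)
    exact h1.isInfix.trans (List.drop_suffix j s).isInfix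

-- lower is character-wise, so it preserves length
lemma hrp_length_lower (s : List Char) : (PySem.Chars.lower s).length = s.length := by
  simp [PySem.Chars.lower]

-- the generated triple list (closed term) and its facts
def hrpGen : List (List Char) :=
  hrpRowsA.flatMap (fun row =>
    (PySem.List.pyRange 0 ((row.length : Int) - 2) 1).map (fun i =>
      PySem.List.slice row (some i) (some (i+3))))

lemma hrp_gen_len3 : ∀ t ∈ hrpGen, t.length = 3 := by decide

lemma hrp_keys_mem (t : List Char) : PySem.Set.contains hrpKeyTriples t = true ↔ t ∈ hrpGen := by
  rw [PySem.Set.contains_iff]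
  have h : hrpKeyTriples = PySem.Set.ofList hrpGen := by decide
  rw [h, PySem.Set.mem_ofList]

-- A's third loop equals the per-window membership test
lemma hrp_loop3_eq (l : List Char) :
    (hrpRowsA.any (fun row =>
       (PySem.List.pyRange 0 ((row.length : Int) - 2) 1).any (fun i =>
         PySem.Chars.isIn (PySem.List.slice row (some i) (some (i+3))) (PySem.Chars.lower l))))
    = ((PySem.List.pyRange 0 ((l.length : Int) - 2) 1).any (fun i =>
         PySem.Set.contains hrpKeyTriples (PySem.List.slice (PySem.Chars.lower l) (some i) (some (i+3))))) := by
  rw [Bool.eq_iff_iff]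
  simp only [List.any_eq_true]
  constructor
  · rintro ⟨row, hrow, i, hi, hin⟩
    have htg : PySem.List.slice row (some i) (some (i+3)) ∈ hrpGen := by
      unfold hrpGen
      simp only [List.mem_flatMap, List.mem_map]
      exact ⟨row, hrow, i, hi, rfl⟩
    have h3 := hrp_gen_len3 _ htg
    rw [PySem.Chars.isIn_iff_infix, hrp_infix3_iff _ _ h3, hrp_length_lower] at hin
    obtain ⟨j, hj, hsl⟩ := hin
    exact ⟨j, hj, by rw [hrp_keys_mem, hsl]; exact htg⟩
  · rintro ⟨i, hi, hin⟩
    rw [hrp_keys_mem] at hin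
    have h3 := hrp_gen_len3 _ hin
    unfold hrpGen at hin
    simp only [List.mem_flatMap, List.mem_map] at hin
    obtain ⟨row, hrow, j, hj, hsl⟩ := hin
    refine ⟨row, hrow, j, hj, ?_⟩
    rw [PySem.Chars.isIn_iff_infix, hsl, hrp_infix3_iff _ _ (hsl ▸ h3), hrp_length_lower]
    exact ⟨i, hi, rfl⟩

-- ===== VERDICT (by name: the statement is the Claim_ definition above) =====
theorem has_repetitive_patterns_spec : Claim_equal_has_repetitive_patterns := by
  intro password _
  unfold Spec_has_repetitive_patterns has_repetitive_patterns has_repetitive_patterns_alt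
  simp only []
  rw [hrp_loop3_eq, Bool.eq_iff_iff]
  simp only [List.any_eq_true, Bool.or_eq_true]
  constructor
  · intro h
    split_ifs at h with h1 h2 h3
    · obtain ⟨i, hi, hp⟩ := h1
      exact ⟨i, hi, Or.inl (Or.inl hp)⟩
    · obtain ⟨i, hi, hp⟩ := h2
      exact ⟨i, hi, Or.inl (Or.inr hp)⟩
    · obtain ⟨i, hi, hp⟩ := h3
      exact ⟨i, hi, Or.inr hp⟩
  · rintro ⟨i, hi, hp⟩
    split_ifs with h1 h2 h3
    · rfl
    · rfl
    · rfl
    · rcases hp with (hp | hp) | hp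
      · exact (h1 ⟨i, hi, hp⟩).elim
      · exact (h2 ⟨i, hi, hp⟩).elim
      · exact (h3 ⟨i, hi, hp⟩).elim
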